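-- pv_equiv track=rewrite | github.com/heineaabo/QuantumAlgorithms | quantum_algorithms/tools.py | get_num_parameters
-- ===== SOURCE A (Python) =====
-- def get_num_parameters(n,l):
--     S = n*(l-n)
--     D = 0
--     for i in range(n):
--         for j in range(i+1,n):
--             for a in range(n,l):
--                 for b in range(a+1,l):
--                     D += 1
--     return S, D
-- ===== SOURCE B (Python) =====
-- def get_num_parameters(n, l):
--     np = n if n > 0 else 0
--     m = l - n if l - n > 0 else 0
--     D = (np * (np - 1) // 2) * (m * (m - 1) // 2)
--     return n * (l - n), D
-- ===== Notes on version B (the rewrite author's own statement) =====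
-- stated objective: faster
-- what changed: Replaces the four nested counting loops by the closed form D = C(max(n,0),2) * C(max(l-n,0),2).
import Mathlib
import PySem

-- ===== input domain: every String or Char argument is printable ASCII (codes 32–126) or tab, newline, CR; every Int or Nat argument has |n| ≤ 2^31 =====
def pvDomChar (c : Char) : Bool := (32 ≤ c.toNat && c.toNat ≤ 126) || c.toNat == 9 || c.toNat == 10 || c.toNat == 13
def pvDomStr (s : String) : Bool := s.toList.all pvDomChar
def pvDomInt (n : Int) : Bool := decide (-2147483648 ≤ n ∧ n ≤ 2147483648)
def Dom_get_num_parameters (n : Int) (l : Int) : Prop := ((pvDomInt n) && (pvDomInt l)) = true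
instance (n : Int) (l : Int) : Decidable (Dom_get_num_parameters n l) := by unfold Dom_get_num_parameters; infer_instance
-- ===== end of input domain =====

-- B replaces A's four nested counting loops by the closed form D = C(max(n,0),2) * C(max(l-n,0),2) (objective: faster).

-- ===== PORT A =====
def get_num_parameters (n : Int) (l : Int) : Int × Int :=
  let S := n * (l - n)
  let D := (PySem.List.pyRange 0 n 1).foldl (fun D i =>
    (PySem.List.pyRange (i + 1) n 1).foldl (fun D _j =>
      (PySem.List.pyRange n l 1).foldl (fun D a =>
        (PySem.List.pyRange (a + 1) l 1).foldl (fun D _b => D + 1) D) D) D) (0 : Int)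
  (S, D)

-- ===== PORT B =====
def get_num_parameters_alt (n : Int) (l : Int) : Int × Int :=
  let np : Int := if n > 0 then n else 0
  let m : Int := if l - n > 0 then l - n else 0
  let D := (PySem.Int.floordiv (np * (np - 1)) 2) * (PySem.Int.floordiv (m * (m - 1)) 2)
  (n * (l - n), D)

-- ===== PRECONDITION & SPEC =====
def Spec_get_num_parameters (n : Int) (l : Int) (out : Int × Int) : Prop := out = get_num_parameters_alt n l
instance (n : Int) (l : Int) (out : Int × Int) : Decidable (Spec_get_num_parameters n l out) := by unfold Spec_get_num_parameters; infer_instance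

-- ===== CLAIM (what is proved, stated in full; the proofs are below) =====
def Claim_equal_get_num_parameters : Prop := ∀ (n : Int) (l : Int), Dom_get_num_parameters n l → Spec_get_num_parameters n l (get_num_parameters n l)

-- ===== LEMMAS AND PROOFS =====

/-- Triangular numbers: triN k = 0 + 1 + … + (k-1) = C(k,2). -/
def triN : Nat → Nat
  | 0 => 0
  | k + 1 => k + triN k

theorem two_triN (k : Nat) : 2 * triN k = k * (k - 1) := by
  induction k with
  | zero => rfl
  | succ j ih =>
    cases j with
    | zero => rfl
    | succ i =>
      simp only [triN, Nat.succ_sub_one] at ih ⊢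
      nlinarith [ih]

/-- Sum of the inner-loop lengths over a range is a triangular number. -/
theorem tri_sum (k : Nat) (c d : Int) (hk : (d - c).toNat = k) :
    ((PySem.List.pyRange c d 1).map (fun a => (((d - a - 1).toNat : Nat) : Int))).sum
      = (triN k : Int) := by
  induction k generalizing c with
  | zero =>
    rw [PySem.List.pyRange_one_eq_nil (by omega)]
    simp [triN]
  | succ j ih =>
    rw [PySem.List.pyRange_one_cons (by omega)]
    rw [List.map_cons, List.sum_cons, ih (c + 1) (by omega)]
    have h1 : (d - c - 1).toNat = j := by omega
    simp only [h1, triN]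
    push_cast
    ring

theorem sum_map_const (l : List Int) (c : Int) :
    (l.map (fun _ => c)).sum = (l.length : Int) * c := by
  induction l with
  | nil => simp
  | cons x xs _ => simp; ring

theorem inner_fold (l a D : Int) :
    (PySem.List.pyRange (a + 1) l 1).foldl (fun D _b => D + 1) D
      = D + ((l - a - 1).toNat : Int) := by
  rw [show (fun (D : Int) (_b : Int) => D + 1) = (fun D x => D + (fun _ => (1 : Int)) x) from rfl]
  rw [PySem.List.foldl_add]
  rw [sum_map_const, PySem.List.length_pyRange_one]
  have : (l - (a + 1)).toNat = (l - a - 1).toNat := by omega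
  simp [this]

theorem ab_fold (n l D : Int) :
    (PySem.List.pyRange n l 1).foldl (fun D a =>
        (PySem.List.pyRange (a + 1) l 1).foldl (fun D _b => D + 1) D) D
      = D + (triN (l - n).toNat : Int) := by
  simp only [inner_fold]
  rw [PySem.List.foldl_add (g := fun a => (((l - a - 1).toNat : Nat) : Int))]
  rw [tri_sum (l - n).toNat n l rfl]

theorem j_fold (i n D T : Int) :
    (PySem.List.pyRange (i + 1) n 1).foldl (fun D _j => D + T) D
      = D + ((n - i - 1).toNat : Int) * T := by
  rw [show (fun (D : Int) (_j : Int) => D + T) = (fun D x => D + (fun _ => T) x) from rfl]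
  rw [PySem.List.foldl_add]
  rw [sum_map_const, PySem.List.length_pyRange_one]
  have : (n - (i + 1)).toNat = (n - i - 1).toNat := by omega
  simp [this]

theorem D_loops_eq (n l : Int) :
    (PySem.List.pyRange 0 n 1).foldl (fun D i =>
      (PySem.List.pyRange (i + 1) n 1).foldl (fun D _j =>
        (PySem.List.pyRange n l 1).foldl (fun D a =>
          (PySem.List.pyRange (a + 1) l 1).foldl (fun D _b => D + 1) D) D) D) (0 : Int)
      = (triN n.toNat : Int) * (triN (l - n).toNat : Int) := by
  simp only [ab_fold]
  simp only [j_fold]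
  rw [PySem.List.foldl_add (g := fun i => (((n - i - 1).toNat : Nat) : Int) * (triN (l - n).toNat : Int))]
  rw [List.sum_map_mul_right]
  rw [tri_sum n.toNat 0 n (by omega)]
  ring

theorem floordiv_tri (x : Int) :
    PySem.Int.floordiv ((if x > 0 then x else 0) * ((if x > 0 then x else 0) - 1)) 2
      = (triN x.toNat : Int) := by
  have key : (if x > 0 then x else 0) * ((if x > 0 then x else 0) - 1)
      = 2 * (triN x.toNat : Int) := by
    by_cases h : x > 0
    · simp only [if_pos h]
      have hk : (x.toNat : Int) = x := by omega
      have h2 := two_triN x.toNat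
      have hc : ((x.toNat * (x.toNat - 1) : Nat) : Int) = x * (x - 1) := by
        push_cast [Nat.cast_sub (by omega : 1 ≤ x.toNat)]
        rw [hk]
      calc x * (x - 1) = ((x.toNat * (x.toNat - 1) : Nat) : Int) := hc.symm
        _ = ((2 * triN x.toNat : Nat) : Int) := by rw [h2]
        _ = 2 * (triN x.toNat : Int) := by push_cast; ring
    · simp only [if_neg h]
      have : x.toNat = 0 := by omega
      simp [this, triN]
  rw [key, PySem.Int.floordiv_eq_ediv_of_pos (by norm_num)]
  exact Int.mul_ediv_cancel_left _ (by norm_num)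

-- ===== VERDICT (by name: the statement is the Claim_ definition above) =====
theorem get_num_parameters_spec : Claim_equal_get_num_parameters := by
  intro n l _
  unfold Spec_get_num_parameters get_num_parameters get_num_parameters_alt
  simp only
  rw [D_loops_eq, floordiv_tri n, floordiv_tri (l - n)]
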